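-- pv_equiv track=rewrite | github.com/Blue-Net-Team/Serial-Plus | ser.py | get_byte_size
-- ===== SOURCE A (Python) =====
-- def get_byte_size(n):
--     if n == 0:
--         return 1
--     bytes = 0
--     while n:
--         n >>= 8
--         bytes += 1
--     return bytes
-- ===== SOURCE B (Python) =====
-- def get_byte_size(n):
--     if n == 0:
--         return 1
--     return (n.bit_length() + 7) // 8
-- ===== Notes on version B (the rewrite author's own statement) =====
-- stated objective: idiomatic
-- what changed: Replaces the iterative 8-bit shift-and-count loop with the closed form (n.bit_length() + 7) // 8, keeping the n == 0 guard.
-- outside the precondition, e.g. on get_byte_size(-1): A does not finish within the time limit, B returns 1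
import Mathlib
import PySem

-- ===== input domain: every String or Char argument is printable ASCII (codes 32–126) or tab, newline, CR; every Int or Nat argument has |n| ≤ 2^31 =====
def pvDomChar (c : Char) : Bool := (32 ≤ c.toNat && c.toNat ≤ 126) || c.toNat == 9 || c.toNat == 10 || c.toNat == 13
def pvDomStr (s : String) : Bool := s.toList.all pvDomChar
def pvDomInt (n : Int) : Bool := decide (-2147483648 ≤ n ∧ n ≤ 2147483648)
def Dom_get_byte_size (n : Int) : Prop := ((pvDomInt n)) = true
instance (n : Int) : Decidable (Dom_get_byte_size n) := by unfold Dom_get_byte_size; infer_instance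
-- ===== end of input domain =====

-- B replaces A's 8-bit shift-and-count loop with the closed form (bit_length + 7) // 8 (idiomatic).

-- ===== PORT A =====
-- the while loop; fuel only makes the recursion total (64 iterations cover every n in Dom;
-- the loop body is exactly Python's: n >>= 8, bytes += 1, stop when n == 0)
def get_byte_size_loop (fuel : Nat) (n : Int) (bytes : Int) : Int :=
  match fuel with
  | 0 => bytes
  | f + 1 => if n = 0 then bytes else get_byte_size_loop f (n >>> (8 : Nat)) (bytes + 1)

def get_byte_size (n : Int) : Int :=
  if n = 0 then 1 else get_byte_size_loop 64 n 0

-- ===== PORT B =====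
def get_byte_size_alt (n : Int) : Int :=
  if n = 0 then 1 else PySem.Int.floordiv ((PySem.Int.bitLength n : Nat) + 7) 8

-- ===== PRECONDITION & SPEC =====
-- Pre_ excludes negative n, on which Python A never returns (the while loop runs forever: n >> 8 stays -1).
def Pre_get_byte_size (n : Int) : Prop := 0 ≤ n
instance (n : Int) : Decidable (Pre_get_byte_size n) := by unfold Pre_get_byte_size; infer_instance
def pvWitness_get_byte_size : Int := 300

def Spec_get_byte_size (n : Int) (out : Int) : Prop := out = get_byte_size_alt n
instance (n : Int) (out : Int) : Decidable (Spec_get_byte_size n out) := by unfold Spec_get_byte_size; infer_instance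

-- ===== CLAIM (what is proved, stated in full; the proofs are below) =====
def Claim_equal_get_byte_size : Prop := ∀ (n : Int), Dom_get_byte_size n → Pre_get_byte_size n → Spec_get_byte_size n (get_byte_size n)

-- ===== LEMMAS AND PROOFS =====

-- bit-length bracket uniqueness: 2^(k-1) ≤ m < 2^k pins bitLength to k
lemma bitLength_eq_of_bracket (m k : Nat) (hk : 1 ≤ k)
    (hlo : 2 ^ (k - 1) ≤ m) (hhi : m < 2 ^ k) :
    PySem.Int.bitLength (m : Int) = k := by
  have hm0 : m ≠ 0 := by
    intro h; subst h
    have : 0 < (2 : Nat) ^ (k - 1) := by positivity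
    omega
  have h1 : m < 2 ^ PySem.Int.bitLength (m : Int) := by
    simpa using PySem.Int.lt_two_pow_bitLength (m : Int)
  have h2 : 2 ^ (PySem.Int.bitLength (m : Int) - 1) ≤ m := by
    have := PySem.Int.two_pow_bitLength_le (m : Int) (by exact_mod_cast hm0)
    simpa using this
  have hA : k - 1 < PySem.Int.bitLength (m : Int) :=
    (Nat.pow_lt_pow_iff_right (by norm_num)).mp (lt_of_le_of_lt hlo h1)
  have hB : PySem.Int.bitLength (m : Int) - 1 < k :=
    (Nat.pow_lt_pow_iff_right (by norm_num)).mp (lt_of_le_of_lt h2 hhi)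
  have hpos : 1 ≤ PySem.Int.bitLength (m : Int) := by
    by_contra h
    have : PySem.Int.bitLength (m : Int) = 0 := by omega
    rw [this] at h1; omega
  omega

lemma bitLength_div256 (m : Nat) (h : 256 ≤ m) :
    PySem.Int.bitLength ((m / 256 : Nat) : Int) = PySem.Int.bitLength (m : Int) - 8 := by
  set B := PySem.Int.bitLength (m : Int) with hB
  have h1 : m < 2 ^ B := by simpa using PySem.Int.lt_two_pow_bitLength (m : Int)
  have h2 : 2 ^ (B - 1) ≤ m := by
    have := PySem.Int.two_pow_bitLength_le (m : Int) (by positivity)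
    simpa using this
  have hB9 : 9 ≤ B := by
    have : (2 : Nat) ^ 8 ≤ m := by norm_num; omega
    have := (Nat.pow_lt_pow_iff_right (a := 2) (by norm_num)).mp (lt_of_le_of_lt this h1)
    omega
  apply bitLength_eq_of_bracket _ (B - 8) (by omega)
  · -- 2 ^ (B - 8 - 1) ≤ m / 256
    have h2' : 2 ^ (B - 9) * 256 ≤ m := by
      have he : (2 : Nat) ^ (B - 1) = 2 ^ (B - 9) * 256 := by
        rw [show (256 : Nat) = 2 ^ 8 by norm_num, ← pow_add]; congr 1 <;> omega
      rw [he] at h2; exact h2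
    calc 2 ^ (B - 8 - 1) = 2 ^ (B - 9) := by congr 1
      _ ≤ m / 256 := (Nat.le_div_iff_mul_le (by norm_num)).mpr h2'
  · -- m / 256 < 2 ^ (B - 8)
    have : m < 2 ^ (B - 8) * 256 := by
      have : (2 : Nat) ^ B = 2 ^ (B - 8) * 2 ^ 8 := by rw [← pow_add]; congr 1 <;> omega
      rw [this] at h1; norm_num at h1; omega
    omega

lemma shift8_natCast (m : Nat) : ((m : Int) >>> (8 : Nat)) = ((m / 256 : Nat) : Int) := by
  have : ((m : Int) >>> (8 : Nat)) = ((m >>> 8 : Nat) : Int) := by simp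
  rw [this, Nat.shiftRight_eq_div_pow]

lemma loop_closed (fuel : Nat) : ∀ (m : Nat) (b : Int), 0 < m → m < 2 ^ (8 * fuel) →
    get_byte_size_loop fuel (m : Int) b = b + (((PySem.Int.bitLength (m : Int) + 7) / 8 : Nat) : Int) := by
  induction fuel with
  | zero => intro m b hm hlt; simp at hlt; omega
  | succ f ih =>
    intro m b hm hlt
    have hne : (m : Int) ≠ 0 := by exact_mod_cast hm.ne'
    rw [get_byte_size_loop, if_neg hne, shift8_natCast]
    by_cases hsm : m < 256
    · -- quotient is 0; the next iteration (or fuel exhaustion) returns b + 1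
      have hq : m / 256 = 0 := Nat.div_eq_of_lt hsm
      have hL : get_byte_size_loop f ((0 : Nat) : Int) (b + 1) = b + 1 := by
        cases f <;> simp [get_byte_size_loop]
      rw [hq, hL]
      have hbl : PySem.Int.bitLength (m : Int) = PySem.Int.bitLength (m : Int) := rfl
      have h1 : m < 2 ^ PySem.Int.bitLength (m : Int) := by
        simpa using PySem.Int.lt_two_pow_bitLength (m : Int)
      have h2 : 2 ^ (PySem.Int.bitLength (m : Int) - 1) ≤ m := by
        have := PySem.Int.two_pow_bitLength_le (m : Int) (by exact_mod_cast hm.ne')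
        simpa using this
      have hle8 : PySem.Int.bitLength (m : Int) ≤ 8 := by
        by_contra h
        have : (2 : Nat) ^ 8 ≤ 2 ^ (PySem.Int.bitLength (m : Int) - 1) :=
          Nat.pow_le_pow_right (by norm_num) (by omega)
        omega
      have hpos : 1 ≤ PySem.Int.bitLength (m : Int) := by
        by_contra h
        have : PySem.Int.bitLength (m : Int) = 0 := by omega
        rw [this] at h1; omega
      have : ((PySem.Int.bitLength (m : Int) + 7) / 8 : Nat) = 1 := by omega
      rw [this]; push_cast; ring
    · have hq : 0 < m / 256 := Nat.div_pos (by omega) (by norm_num)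
      have hlt' : m / 256 < 2 ^ (8 * f) := by
        have : m < 2 ^ (8 * f) * 256 := by
          have he : (2 : Nat) ^ (8 * (f + 1)) = 2 ^ (8 * f) * 2 ^ 8 := by
            rw [← pow_add]; congr 1
          rw [he] at hlt; norm_num at hlt; omega
        omega
      rw [ih (m / 256) (b + 1) hq hlt', bitLength_div256 m (by omega)]
      have hB9 : 9 ≤ PySem.Int.bitLength (m : Int) := by
        have h1 : m < 2 ^ PySem.Int.bitLength (m : Int) := by
          simpa using PySem.Int.lt_two_pow_bitLength (m : Int)
        have h256 : (2 : Nat) ^ 8 ≤ m := by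
          calc (2 : Nat) ^ 8 = 256 := by norm_num
            _ ≤ m := by omega
        have := (Nat.pow_lt_pow_iff_right (a := 2) (by norm_num)).mp (lt_of_le_of_lt h256 h1)
        omega
      omega

-- ===== VERDICT (by name: the statement is the Claim_ definition above) =====
theorem get_byte_size_spec : Claim_equal_get_byte_size := by
  intro n hdom hpre
  unfold Spec_get_byte_size get_byte_size get_byte_size_alt
  by_cases h0 : n = 0
  · simp [h0]
  · rw [if_neg h0, if_neg h0]
    obtain ⟨m, rfl⟩ := Int.eq_ofNat_of_zero_le hpre
    have hm : 0 < m := by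
      rcases Nat.eq_zero_or_pos m with h | h
      · exact absurd (by exact_mod_cast h0) (by simp [h])
      · exact h
    have hdom' : m ≤ 2147483648 := by
      unfold Dom_get_byte_size pvDomInt at hdom
      simp only [decide_eq_true_eq] at hdom
      exact_mod_cast hdom.2
    have hlt : m < 2 ^ (8 * 64) :=
      lt_of_le_of_lt hdom' (by
        calc (2147483648 : Nat) < 2 ^ 32 := by norm_num
          _ ≤ 2 ^ (8 * 64) := Nat.pow_le_pow_right (by norm_num) (by norm_num))
    rw [loop_closed 64 m 0 hm hlt]
    rw [PySem.Int.floordiv_eq_ediv_of_pos (by norm_num)]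
    omega
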